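-- pv_equiv track=rewrite | github.com/Clod98/Scientific-computing-project | project1.py | complete_shuffle
-- ===== SOURCE A (Python) =====
-- def m_shuffling(m,k,l,first,freq):
--
--     """
--     This function performs the m-shuffling
--
--     Parameters:
--     m (int): the number of the suffling
--     k (int): the dimension of the input list "l" (actually half of it)
--     l (list): the list to be shuffled
--     first (list): vector such that first[h] is the first time h+1 has been on top
--     freq (list): vector such that freq[h] is the number of times h+1 has been on top
--
--     Returns:
--     l (list): the list after the m-shuffling
--     first (list): vector first after the m-shuffling
--     freq (list): vector freq after the m-shuffling
--
--     """
--
--     """ here we store the first 2m elements of list "l" """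
--     temp = [0]*(2*m)
--     for i in range(2*m):
--         temp[i] = l[i]
--
--     """
--     We noticed that element i of list "l" will be send
--     in position 2*i+1 if i<m or in position (i-m)*2 if m<=i<2*m
--     """
--     for i in range(m):
--         l[2*i+1] = temp[i]
--     for i in range(m,2*m):
--         l[(i-m)*2] = temp[i]
--
--     """
--     If the element now on top has never been on top before we
--     update the list "first" using the current shuffling.
--     Notice how we need to subtract 1 from the elements in list "l" in
--     order to access list "first" since the elements in "l" are the numbers from
--     1 to 2*k
--     """
--     if first[l[0]-1] == 0:
--         first[l[0]-1] = m
--     """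
--     We also update the list of frequencies
--     """
--     freq[l[0]-1] = freq[l[0]-1]+1
--
--     return
--
-- def complete_shuffle(k):
--
--     """The actual function of our project
--
--     Parameters:
--     k (int): half of the dimension of our list
--
--     Returns:
--     L (list): the three first elements of our complete list after the complete shuffling
--     s (int): the first time the top element has been on top
--     f (int): number of times the top element has been on top
--
--     """
--     l = list(range(1,2*k+1))
--     first = [0]*(2*k)
--     freq = [0]*(2*k)
--     for m in range(1,k+1):
--         m_shuffling(m,k,l,first,freq)
--     L = [l[0],l[1],l[2]]
--     s = first[l[0]-1]
--     f = freq[l[0]-1]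
--
--     return L,s,f
-- ===== SOURCE B (Python) =====
-- def complete_shuffle(k):
--     """Compute each needed element by tracing its position backward through the
--     rounds' inverse permutation; no list shuffling, no first/freq arrays."""
--     def back(pos, m):
--         # value at position `pos` after rounds 1..m
--         for r in range(m, 0, -1):
--             if pos < 2 * r:
--                 pos = r + pos // 2 if pos % 2 == 0 else (pos - 1) // 2
--         return pos + 1
--     tops = [back(0, m) for m in range(1, k + 1)]
--     L = [back(0, k), back(1, k), back(2, k)]
--     s = tops.index(L[0]) + 1
--     f = tops.count(L[0])
--     return L, s, f
-- ===== Notes on version B (the rewrite author's own statement) =====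
-- stated objective: alternative
-- what changed: B never simulates the list: each needed element (the final top three and every round's top) is computed by tracing its position backward through the inverse of each round's interleave permutation, and s/f for the final top come from one scan of the traced tops; A forward-shuffles the full list each round and maintains per-element first/freq arrays.
import Mathlib
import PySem

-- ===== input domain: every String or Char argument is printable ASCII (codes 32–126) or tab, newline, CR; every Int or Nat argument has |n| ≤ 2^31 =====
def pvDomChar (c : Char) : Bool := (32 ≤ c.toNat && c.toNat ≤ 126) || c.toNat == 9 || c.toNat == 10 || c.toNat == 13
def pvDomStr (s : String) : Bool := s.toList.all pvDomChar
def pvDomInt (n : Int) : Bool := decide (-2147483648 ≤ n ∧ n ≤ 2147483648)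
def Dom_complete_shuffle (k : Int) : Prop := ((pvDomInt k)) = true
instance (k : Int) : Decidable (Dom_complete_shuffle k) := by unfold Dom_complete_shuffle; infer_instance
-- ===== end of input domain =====

-- B replaces A's forward list simulation + first/freq arrays by backward position
-- tracing through the inverse permutations (objective: alternative algorithm, same cost).

-- ===== PORT A =====
-- m_shuffling mutates l/first/freq in place in Python; here it returns the three
-- updated lists.  All indices it uses are nonnegative and in range within
-- Pre_complete_shuffle, so reads are `getD` and writes are `set`.
def m_shuffling (m _k : Int) (l first freq : List Int) : List Int × List Int × List Int :=
  let mn := m.toNat          -- m comes from range(1, k+1), so m ≥ 1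
  -- temp = [0]*(2*m); for i in range(2*m): temp[i] = l[i]
  let temp := (List.range (2*mn)).foldl (fun t i => t.set i (l.getD i 0)) (List.replicate (2*mn) 0)
  -- for i in range(m): l[2*i+1] = temp[i]
  let l1 := (List.range mn).foldl (fun a i => a.set (2*i+1) (temp.getD i 0)) l
  -- for i in range(m, 2*m): l[(i-m)*2] = temp[i]
  let l2 := (List.range' mn mn).foldl (fun a i => a.set ((i - mn)*2) (temp.getD i 0)) l1
  let top := l2.getD 0 0
  let idx := (top - 1).toNat  -- within Pre_, 1 ≤ l[0], so l[0]-1 is a nonnegative in-range index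
  let first' := if first.getD idx 0 = 0 then first.set idx m else first
  let freq' := freq.set idx (freq.getD idx 0 + 1)
  (l2, first', freq')

def complete_shuffle (k : Int) : List Int × Int × Int :=
  let l0 := PySem.List.pyRange 1 (2*k+1) 1
  let n := (2*k).toNat
  let st := (PySem.List.pyRange 1 (k+1) 1).foldl
      (fun st m => m_shuffling m k st.1 st.2.1 st.2.2)
      (l0, List.replicate n 0, List.replicate n 0)
  let l := st.1
  let top := l.getD 0 0      -- within Pre_, l has ≥ 4 elements, so l[0],l[1],l[2] are in range
  ([l.getD 0 0, l.getD 1 0, l.getD 2 0],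
   st.2.1.getD (top - 1).toNat 0, st.2.2.getD (top - 1).toNat 0)

-- ===== PORT B =====
-- one step of the backward trace: `pos = r + pos // 2 if pos % 2 == 0 else (pos - 1) // 2`
def pvStep (pos r : Int) : Int :=
  if pos < 2*r then
    (if PySem.Int.mod pos 2 = 0 then r + PySem.Int.floordiv pos 2
     else PySem.Int.floordiv (pos-1) 2)
  else pos

-- def back(pos, m): for r in range(m, 0, -1): …; return pos + 1
def pvBack (pos m : Int) : Int :=
  ((PySem.List.pyRange m 0 (-1)).foldl pvStep pos) + 1

def complete_shuffle_alt (k : Int) : List Int × Int × Int :=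
  let tops := (PySem.List.pyRange 1 (k+1) 1).map (fun m => pvBack 0 m)
  let L := [pvBack 0 k, pvBack 1 k, pvBack 2 k]
  -- s = tops.index(L[0]) + 1 : within Pre_ the final top occurs in tops, so index() returns
  let s := match PySem.List.index? tops (L.getD 0 0) with | some i => ((i : Int) + 1) | none => 0
  let f := (PySem.List.count tops (L.getD 0 0) : Int)
  (L, s, f)

-- ===== PRECONDITION & SPEC =====
-- Pre_ excludes exactly the inputs on which A raises: for k ≤ 1 the shuffled list has
-- fewer than 3 elements and `L = [l[0],l[1],l[2]]` raises IndexError.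
def Pre_complete_shuffle (k : Int) : Prop := 2 ≤ k
instance (k : Int) : Decidable (Pre_complete_shuffle k) := by unfold Pre_complete_shuffle; infer_instance
def pvWitness_complete_shuffle : Int := 2

def Spec_complete_shuffle (k : Int) (out : List Int × Int × Int) : Prop := out = complete_shuffle_alt k
instance (k : Int) (out : List Int × Int × Int) : Decidable (Spec_complete_shuffle k out) := by unfold Spec_complete_shuffle; infer_instance

-- ===== CLAIM (what is proved, stated in full; the proofs are below) =====
def Claim_equal_complete_shuffle : Prop := ∀ (k : Int), Dom_complete_shuffle k → Pre_complete_shuffle k → Spec_complete_shuffle k (complete_shuffle k)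

-- ===== LEMMAS AND PROOFS =====

-- the A-side shuffle of one round, exactly as port A computes it
def aShuf (mn : Nat) (l : List Int) : List Int :=
  let temp := (List.range (2*mn)).foldl (fun t i => t.set i (l.getD i 0)) (List.replicate (2*mn) 0)
  let l1 := (List.range mn).foldl (fun a i => a.set (2*i+1) (temp.getD i 0)) l
  (List.range' mn mn).foldl (fun a i => a.set ((i - mn)*2) (temp.getD i 0)) l1

-- the concrete value of one round's shuffle (shared normal form of both analyses)
def cShuf (mn : Nat) (l : List Int) : List Int :=
  ((((l.drop mn).take mn).zip (l.take mn)).flatMap (fun p => [p.1, p.2])) ++ l.drop (2*mn)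

theorem length_foldl_set (xs : List Nat) (p : Nat → Nat) (v : Nat → Int) :
    ∀ l : List Int, (xs.foldl (fun a i => a.set (p i) (v i)) l).length = l.length := by
  induction xs with
  | nil => intro l; rfl
  | cons x xs ih => intro l; simp [List.foldl_cons, ih, List.length_set]

theorem getElem?_foldl_set_range (p q : Nat → Nat) (v : Nat → Int)
    (hq : ∀ i, q (p i) = i) :
    ∀ (n : Nat) (l : List Int) (j : Nat),
      ((List.range n).foldl (fun a i => a.set (p i) (v i)) l)[j]? =
        if (∃ i, i < n ∧ p i = j) ∧ j < l.length then some (v (q j)) else l[j]? := by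
  intro n
  induction n with
  | zero => intro l j; simp
  | succ n ih =>
    intro l j
    rw [List.range_succ, List.foldl_append, List.foldl_cons, List.foldl_nil,
        List.getElem?_set, length_foldl_set, ih]
    by_cases hpj : p n = j
    · subst hpj
      by_cases hl : p n < l.length
      · rw [if_pos rfl, if_pos hl, if_pos ⟨⟨n, by omega, rfl⟩, hl⟩, hq]
      · rw [if_pos rfl, if_neg hl,
            if_neg (fun h => hl h.2), List.getElem?_eq_none (by omega)]
    · rw [if_neg hpj]
      have : ((∃ i, i < n ∧ p i = j) ∧ j < l.length) ↔ ((∃ i, i < n + 1 ∧ p i = j) ∧ j < l.length) := by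
        constructor
        · rintro ⟨⟨i, hi, hpi⟩, hjl⟩; exact ⟨⟨i, by omega, hpi⟩, hjl⟩
        · rintro ⟨⟨i, hi, hpi⟩, hjl⟩
          exact ⟨⟨i, by have : i ≠ n := fun he => hpj (he ▸ hpi); omega, hpi⟩, hjl⟩
      simp only [this]

theorem temp_eq_take (n : Nat) (l : List Int) (h : n ≤ l.length) :
    (List.range n).foldl (fun t i => t.set i (l.getD i 0)) (List.replicate n (0:Int)) = l.take n := by
  apply List.ext_getElem?_iff.mpr
  intro j
  rw [getElem?_foldl_set_range (fun i => i) (fun i => i) (fun i => l.getD i 0) (fun _ => rfl)]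
  simp only [List.length_replicate, List.getElem?_take]
  by_cases hj : j < n
  · rw [if_pos ⟨⟨j, hj, rfl⟩, hj⟩, if_pos hj,
        List.getD_eq_getElem?_getD, List.getElem?_eq_getElem (by omega)]
    rfl
  · rw [if_neg (by rintro ⟨⟨i, hi, rfl⟩, _⟩; omega), if_neg hj, List.getElem?_replicate]
    rw [if_neg hj]

theorem getElem?_zip_flatMap :
    ∀ (as bs : List Int), as.length = bs.length → ∀ j : Nat,
      ((as.zip bs).flatMap (fun p => [p.1, p.2]))[j]? =
        if j < 2*as.length then (if j % 2 = 0 then as[j/2]? else bs[j/2]?) else none := by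
  intro as
  induction as with
  | nil => intro bs h j; simp
  | cons a as ih =>
    intro bs h j
    match bs with
    | [] => simp at h
    | b :: bs =>
      simp only [List.zip_cons_cons, List.flatMap_cons]
      match j with
      | 0 => simp
      | 1 => simp; omega
      | (j+2) =>
        have h' : as.length = bs.length := by simpa using h
        simp only [List.cons_append, List.nil_append, List.getElem?_cons_succ]
        rw [ih bs h' j]
        have e1 : (j+2) % 2 = j % 2 := by omega
        have e2 : (j+2) / 2 = j / 2 + 1 := by omega
        by_cases hj : j < 2 * as.length <;> by_cases hp : j % 2 = 0 <;>
          simp [hj, hp, e1, e2] <;> omega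

theorem length_zip_flatMap (as bs : List Int) :
    ((as.zip bs).flatMap (fun p => [p.1, p.2])).length = 2 * min as.length bs.length := by
  simp [List.length_flatMap]
  omega

theorem length_cShuf (mn : Nat) (l : List Int) (h2 : 2*mn ≤ l.length) :
    (cShuf mn l).length = l.length := by
  unfold cShuf
  rw [List.length_append, length_zip_flatMap]
  simp only [List.length_take, List.length_drop]
  omega

theorem aShuf_eq_cShuf (mn : Nat) (l : List Int) (h2 : 2*mn ≤ l.length) :
    aShuf mn l = cShuf mn l := by
  unfold aShuf cShuf
  rw [temp_eq_take (2*mn) l h2]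
  apply List.ext_getElem?_iff.mpr
  intro j
  rw [List.range'_eq_map_range, List.foldl_map,
      getElem?_foldl_set_range (fun i => (mn + i - mn)*2) (fun j => j/2) _ (fun i => by show (mn + i - mn) * 2 / 2 = i; omega),
      length_foldl_set,
      getElem?_foldl_set_range (fun i => 2*i+1) (fun j => j/2) _ (fun i => by show (2*i+1) / 2 = i; omega)]
  have hlas : ((l.drop mn).take mn).length = mn := by simp; omega
  have hlbs : (l.take mn).length = mn := by simp; omega
  have hpl : ((((l.drop mn).take mn).zip (l.take mn)).flatMap (fun p => [p.1, p.2])).length = 2*mn := by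
    rw [length_zip_flatMap, hlas, hlbs]; omega
  by_cases hj : j < 2*mn
  · rw [List.getElem?_append_left (by omega : j < ((((l.drop mn).take mn).zip (l.take mn)).flatMap (fun p => [p.1, p.2])).length),
        getElem?_zip_flatMap _ _ (by rw [hlas, hlbs]) j, hlas, if_pos hj]
    by_cases hp : j % 2 = 0
    · rw [if_pos hp, if_pos ⟨⟨j/2, by omega, by omega⟩, by omega⟩]
      rw [List.getD_eq_getElem?_getD, List.getElem?_take, if_pos (by omega : mn + j/2 < 2*mn),
          List.getElem?_take, if_pos (by omega : j/2 < mn), List.getElem?_drop,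
          List.getElem?_eq_getElem (by omega : mn + j/2 < l.length)]
      rfl
    · rw [if_neg hp,
          if_neg (by rintro ⟨⟨i, hi, hpi⟩, -⟩; omega),
          if_pos ⟨⟨j/2, by omega, by omega⟩, by omega⟩,
          List.getD_eq_getElem?_getD, List.getElem?_take, if_pos (by omega : j/2 < 2*mn),
          List.getElem?_take, if_pos (by omega : j/2 < mn),
          List.getElem?_eq_getElem (by omega : j/2 < l.length)]
      rfl
  · rw [List.getElem?_append_right (by omega : ((((l.drop mn).take mn).zip (l.take mn)).flatMap (fun p => [p.1, p.2])).length ≤ j),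
        if_neg (by rintro ⟨⟨i, hi, hpi⟩, -⟩; omega),
        if_neg (by rintro ⟨⟨i, hi, hpi⟩, -⟩; omega),
        hpl, List.getElem?_drop]
    congr 1
    omega

theorem mem_cShuf (mn : Nat) (l : List Int) (x : Int) (hx : x ∈ cShuf mn l) : x ∈ l := by
  unfold cShuf at hx
  rcases List.mem_append.mp hx with h | h
  · obtain ⟨p, hp, hxp⟩ := List.mem_flatMap.mp h
    obtain ⟨a, b⟩ := p
    obtain ⟨h1, h2⟩ := List.of_mem_zip hp
    simp only [List.mem_cons, List.not_mem_nil, or_false] at hxp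
    rcases hxp with rfl | rfl
    · exact List.mem_of_mem_drop (List.mem_of_mem_take h1)
    · exact List.mem_of_mem_take h2
  · exact List.mem_of_mem_drop h

-- the Nat form of one backward-trace step, and its agreement with pvStep
def nStep (p mn : Nat) : Nat :=
  if p < 2*mn then (if p % 2 = 0 then mn + p/2 else p/2) else p

theorem pvStep_cast (p mn : Nat) : pvStep (p:Int) (mn:Int) = ((nStep p mn : Nat) : Int) := by
  unfold pvStep nStep
  rw [PySem.Int.mod_eq_emod_of_pos (by omega), PySem.Int.floordiv_eq_ediv_of_pos (by omega),
      PySem.Int.floordiv_eq_ediv_of_pos (by omega)]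
  split_ifs <;> omega

theorem nStep_lt (p mn n : Nat) (hp : p < n) (h2 : 2*mn ≤ n) : nStep p mn < n := by
  unfold nStep; split_ifs <;> omega

-- reading one position of the shuffled list = reading the traced position of the input
theorem getD_cShuf (mn : Nat) (l : List Int) (h2 : 2*mn ≤ l.length) (p : Nat) (hp : p < l.length) :
    (cShuf mn l).getD p 0 = l.getD (nStep p mn) 0 := by
  have hlas : ((l.drop mn).take mn).length = mn := by simp; omega
  have hlbs : (l.take mn).length = mn := by simp; omega
  have hpl : ((((l.drop mn).take mn).zip (l.take mn)).flatMap (fun q => [q.1, q.2])).length = 2*mn := by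
    rw [length_zip_flatMap, hlas, hlbs]; omega
  unfold cShuf
  rw [List.getD_eq_getElem?_getD, List.getD_eq_getElem?_getD]
  by_cases hj : p < 2*mn
  · rw [List.getElem?_append_left (by omega),
        getElem?_zip_flatMap _ _ (by rw [hlas, hlbs]) p, hlas, if_pos hj]
    by_cases hp2 : p % 2 = 0
    · have hn : nStep p mn = mn + p/2 := by unfold nStep; rw [if_pos hj, if_pos hp2]
      rw [if_pos hp2, List.getElem?_take, if_pos (by omega : p/2 < mn), List.getElem?_drop, hn]
    · have hn : nStep p mn = p/2 := by unfold nStep; rw [if_pos hj, if_neg hp2]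
      rw [if_neg hp2, List.getElem?_take, if_pos (by omega : p/2 < mn), hn]
  · have hn : nStep p mn = p := by unfold nStep; rw [if_neg hj]
    rw [List.getElem?_append_right (by omega), hpl, List.getElem?_drop, hn]
    congr 2
    omega

-- the state of A's loop after rounds 1..j
def stA (k : Int) (j : Nat) : List Int × List Int × List Int :=
  (PySem.List.pyRange 1 ((j:Int)+1) 1).foldl
    (fun st m => m_shuffling m k st.1 st.2.1 st.2.2)
    (PySem.List.pyRange 1 (2*k+1) 1, List.replicate (2*k).toNat 0, List.replicate (2*k).toNat 0)

theorem m_shuffling_eq (m k : Int) (l first freq : List Int) :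
    m_shuffling m k l first freq =
      (aShuf m.toNat l,
       (if first.getD ((aShuf m.toNat l).getD 0 0 - 1).toNat 0 = 0
          then first.set ((aShuf m.toNat l).getD 0 0 - 1).toNat m else first),
       freq.set ((aShuf m.toNat l).getD 0 0 - 1).toNat
         (freq.getD ((aShuf m.toNat l).getD 0 0 - 1).toNat 0 + 1)) := rfl

theorem stA_succ (k : Int) (j : Nat) :
    stA k (j+1)
      = m_shuffling ((j:Int)+1) k (stA k j).1 (stA k j).2.1 (stA k j).2.2 := by
  have hr : PySem.List.pyRange 1 (((j+1:Nat):Int)+1) 1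
      = PySem.List.pyRange 1 ((j:Int)+1) 1 ++ [((j:Int)+1)] := by
    rw [show (((j+1:Nat):Int)+1) = ((j:Int)+1) + 1 by push_cast; ring]
    exact PySem.List.pyRange_one_succ_right (by omega)
  unfold stA
  rw [hr, List.foldl_append, List.foldl_cons, List.foldl_nil]

theorem stA_len (k : Int) (hk : 2 ≤ k) :
    ∀ j : Nat, (j:Int) ≤ k → (stA k j).1.length = (2*k).toNat := by
  intro j
  induction j with
  | zero =>
    intro _
    have hnil : PySem.List.pyRange 1 (((0:Nat):Int)+1) 1 = [] :=
      PySem.List.pyRange_one_eq_nil (by norm_num)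
    unfold stA
    rw [hnil]
    simp only [List.foldl_nil]
    rw [PySem.List.length_pyRange_one]
    congr 1; omega
  | succ j ih =>
    intro hj
    have hjk : (j:Int) ≤ k := by push_cast at hj ⊢; omega
    have hlen := ih hjk
    have h2 : 2*(j+1) ≤ (stA k j).1.length := by rw [hlen]; push_cast at hj; omega
    rw [stA_succ, m_shuffling_eq]
    have hm : ((j:Int)+1).toNat = j+1 := by omega
    show (aShuf ((j:Int)+1).toNat (stA k j).1).length = (2*k).toNat
    rw [hm, aShuf_eq_cShuf _ _ h2, length_cShuf _ _ h2, hlen]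

theorem stA_fst_succ (k : Int) (hk : 2 ≤ k) (j : Nat) (hj : (j:Int) + 1 ≤ k) :
    (stA k (j+1)).1 = cShuf (j+1) (stA k j).1 := by
  have h2 : 2*(j+1) ≤ (stA k j).1.length := by
    rw [stA_len k hk j (by omega)]; omega
  rw [stA_succ, m_shuffling_eq]
  show aShuf ((j:Int)+1).toNat (stA k j).1 = _
  rw [show ((j:Int)+1).toNat = j+1 by omega, aShuf_eq_cShuf _ _ h2]

-- THE BACKWARD-TRACE CHARACTERISATION: position p of A's list after rounds 1..j holds
-- exactly what B's backward trace computes.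
theorem stA_getD_eq_trace (k : Int) (hk : 2 ≤ k) :
    ∀ j : Nat, (j:Int) ≤ k → ∀ p : Nat, p < (2*k).toNat →
      (stA k j).1.getD p 0 = ((PySem.List.pyRange (j:Int) 0 (-1)).foldl pvStep (p:Int)) + 1 := by
  intro j
  induction j with
  | zero =>
    intro _ p hp
    have hnil : PySem.List.pyRange 1 (((0:Nat):Int)+1) 1 = [] :=
      PySem.List.pyRange_one_eq_nil (by norm_num)
    have hnil2 : PySem.List.pyRange ((0:Nat):Int) 0 (-1) = [] :=
      PySem.List.pyRange_neg_one_eq_nil (by norm_num)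
    unfold stA
    rw [hnil, hnil2]
    simp only [List.foldl_nil]
    rw [List.getD_eq_getElem?_getD, PySem.List.getElem?_pyRange_one,
        if_pos (by omega : p < (2*k+1-1).toNat)]
    simp
    omega
  | succ j ih =>
    intro hj p hp
    have hjk : (j:Int) ≤ k := by push_cast at hj; omega
    have hj1 : (j:Int) + 1 ≤ k := by push_cast at hj; omega
    have hlen := stA_len k hk j hjk
    have h2 : 2*(j+1) ≤ (stA k j).1.length := by rw [hlen]; omega
    have hcast : (((j+1:Nat)):Int) = (j:Int) + 1 := by push_cast; ring
    have hplt : p < (stA k j).1.length := by rw [hlen]; exact hp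
    have hns : nStep p (j+1) < (2*k).toNat := nStep_lt p (j+1) (2*k).toNat hp (by omega)
    have hstep : pvStep (p:Int) ((j:Int)+1) = ((nStep p (j+1) : Nat) : Int) := by
      rw [← hcast]; exact pvStep_cast p (j+1)
    have hsplit : PySem.List.pyRange ((j:Int)+1) 0 (-1)
        = ((j:Int)+1) :: PySem.List.pyRange (j:Int) 0 (-1) := by
      have h := PySem.List.pyRange_neg_one_cons (a := (j:Int)+1) (b := 0) (by omega)
      rw [show ((j:Int)+1)-1 = (j:Int) by ring] at h
      exact h
    rw [stA_fst_succ k hk j hj1, getD_cShuf (j+1) _ h2 p hplt, ih hjk _ hns, hcast,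
        hsplit, List.foldl_cons, hstep]

-- the recorded sequence of tops after rounds 1..j (proof-side; B computes it by tracing)
def topsUpTo (k : Int) (j : Nat) : List Int :=
  (PySem.List.pyRange 1 ((j:Int)+1) 1).map (fun m => (stA k m.toNat).1.getD 0 0)

theorem topsUpTo_succ (k : Int) (j : Nat) :
    topsUpTo k (j+1) = topsUpTo k j ++ [(stA k (j+1)).1.getD 0 0] := by
  have hr : PySem.List.pyRange 1 (((j+1:Nat):Int)+1) 1
      = PySem.List.pyRange 1 ((j:Int)+1) 1 ++ [((j:Int)+1)] := by
    rw [show (((j+1:Nat):Int)+1) = ((j:Int)+1) + 1 by push_cast; ring]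
    exact PySem.List.pyRange_one_succ_right (by omega)
  unfold topsUpTo
  rw [hr, List.map_append]
  simp only [List.map_cons, List.map_nil]
  rw [show ((j:Int)+1).toNat = j + 1 by omega]

theorem length_topsUpTo (k : Int) (j : Nat) : (topsUpTo k j).length = j := by
  unfold topsUpTo
  rw [List.length_map, PySem.List.length_pyRange_one]
  omega

-- "first-time" value A stores for x, read off the record of tops
def sVal (tops : List Int) (x : Int) : Int :=
  match PySem.List.index? tops x with | some i => ((i : Int) + 1) | none => 0

theorem sVal_eq_zero_iff (tops : List Int) (x : Int) : sVal tops x = 0 ↔ x ∉ tops := by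
  unfold sVal
  rcases h : PySem.List.index? tops x with - | i
  · simp [(PySem.List.index?_eq_none_iff tops x).mp h]
  · have : x ∈ tops := (PySem.List.index?_isSome_iff tops x).mp (by rw [h]; rfl)
    simp [this]
    omega

theorem sVal_append (tops : List Int) (a v : Int) :
    sVal (tops ++ [a]) v =
      if v ∈ tops then sVal tops v
      else if v = a then (tops.length : Int) + 1 else 0 := by
  unfold sVal
  by_cases hv : v ∈ tops
  · rw [PySem.List.index?_append_of_mem [a] hv, if_pos hv]
  · rw [if_neg hv]
    by_cases hva : v = a
    · subst hva
      rw [PySem.List.index?_append_singleton_self tops v hv, if_pos rfl]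
    · rw [if_neg hva]
      have : PySem.List.index? (tops ++ [a]) v = none := by
        rw [PySem.List.index?_eq_none_iff (tops ++ [a]) v]
        simp [hv, hva]
      rw [this]

theorem getD_set_self (l : List Int) (i : Nat) (v : Int) (h : i < l.length) :
    (l.set i v).getD i 0 = v := by
  simp [List.getD_eq_getElem?_getD, h]

theorem getD_set_ne (l : List Int) (i h' : Nat) (v : Int) (hne : i ≠ h') :
    (l.set i v).getD h' 0 = l.getD h' 0 := by
  simp [List.getD_eq_getElem?_getD, hne]

theorem getD_replicate (n j : Nat) : (List.replicate n (0:Int)).getD j 0 = 0 := by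
  simp [List.getD_eq_getElem?_getD, List.getElem?_replicate]
  split <;> simp

set_option maxHeartbeats 2000000 in
theorem invariant (k : Int) (hk : 2 ≤ k) :
    ∀ j : Nat, (j : Int) ≤ k →
      (∀ x ∈ (stA k j).1, 1 ≤ x ∧ x ≤ 2*k) ∧
      (stA k j).2.1.length = (2*k).toNat ∧
      (stA k j).2.2.length = (2*k).toNat ∧
      (∀ h : Nat, h < (2*k).toNat →
        (stA k j).2.1.getD h 0 = sVal (topsUpTo k j) ((h:Int)+1) ∧
        (stA k j).2.2.getD h 0 = ((topsUpTo k j).count ((h:Int)+1) : Int)) := by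
  intro j
  induction j with
  | zero =>
    intro _
    have hnil : PySem.List.pyRange 1 (((0:Nat):Int)+1) 1 = [] := by
      rw [PySem.List.pyRange_one_eq_nil]
      norm_num
    have htops : topsUpTo k 0 = [] := by unfold topsUpTo; rw [hnil]; rfl
    unfold stA
    rw [hnil]
    simp only [List.foldl_nil]
    refine ⟨?_, by simp, by simp, ?_⟩
    · intro x hx
      have := PySem.List.mem_pyRange_one.mp hx
      omega
    · intro h _
      rw [htops]
      constructor
      · rw [getD_replicate]
        unfold sVal
        rw [show PySem.List.index? ([] : List Int) ((h:Int)+1) = none from rfl]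
      · rw [getD_replicate]
        simp
  | succ j ih =>
    intro hj1
    have hjk : (j : Int) ≤ k := by push_cast at hj1; omega
    obtain ⟨hmem, hflen, hqlen, hfq⟩ := ih hjk
    have hlen := stA_len k hk j hjk
    have h2m : 2*(j+1) ≤ (stA k j).1.length := by rw [hlen]; push_cast at hj1; omega
    have hm : ((j:Int)+1).toNat = j+1 := by omega
    have hsA := stA_succ k j
    have hfst := stA_fst_succ k hk j (by push_cast at hj1; omega)
    have hlenL' : (cShuf (j+1) (stA k j).1).length = (stA k j).1.length := length_cShuf _ _ h2m
    have hpos : 0 < (cShuf (j+1) (stA k j).1).length := by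
      rw [hlenL', hlen]; omega
    have htopmem : (cShuf (j+1) (stA k j).1).getD 0 0 ∈ cShuf (j+1) (stA k j).1 := by
      rw [List.getD_eq_getElem?_getD, List.getElem?_eq_getElem hpos]
      exact List.getElem_mem _
    have htopl : (cShuf (j+1) (stA k j).1).getD 0 0 ∈ (stA k j).1 :=
      mem_cShuf _ _ _ htopmem
    have htopb := hmem _ htopl
    have htops := topsUpTo_succ k j
    rw [hfst] at htops
    rw [hsA, m_shuffling_eq, hm,
        show aShuf (j+1) (stA k j).1 = cShuf (j+1) (stA k j).1 from aShuf_eq_cShuf _ _ h2m]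
    set top := (cShuf (j+1) (stA k j).1).getD 0 0 with htopdef
    set idx := (top - 1).toNat with hidxdef
    have hidx : idx < (2*k).toNat := by omega
    have hidxtop : ((idx:Nat):Int) + 1 = top := by omega
    refine ⟨?_, ?_, ?_, ?_⟩
    · intro x hx
      exact hmem x (mem_cShuf _ _ _ hx)
    · split <;> simp [List.length_set, hflen]
    · simp [List.length_set, hqlen]
    · intro h hh
      rw [htops]
      have hne_of : h ≠ idx → ((h:Int)+1) ≠ top := by
        intro hne he; apply hne; omega
      constructor
      · by_cases hc : (stA k j).2.1.getD idx 0 = 0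
        · rw [if_pos hc]
          have hnotmem : top ∉ topsUpTo k j := by
            have h1 := (hfq idx hidx).1
            rw [hidxtop] at h1
            rw [h1] at hc
            exact (sVal_eq_zero_iff _ _).mp hc
          by_cases hhidx : h = idx
          · subst hhidx
            rw [getD_set_self _ _ _ (by rw [hflen]; exact hidx), hidxtop,
                sVal_append, if_neg hnotmem, if_pos rfl, length_topsUpTo]
          · rw [getD_set_ne _ _ _ _ (fun he => hhidx he.symm), (hfq h hh).1, sVal_append]
            by_cases hm2 : ((h:Int)+1) ∈ topsUpTo k j
            · rw [if_pos hm2]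
            · rw [if_neg hm2, if_neg (hne_of hhidx)]
              exact (sVal_eq_zero_iff _ _).mpr hm2
        · rw [if_neg hc]
          have hmem2 : top ∈ topsUpTo k j := by
            by_contra hn
            apply hc
            rw [(hfq idx hidx).1, hidxtop]
            exact (sVal_eq_zero_iff _ _).mpr hn
          rw [(hfq h hh).1, sVal_append]
          by_cases hm2 : ((h:Int)+1) ∈ topsUpTo k j
          · rw [if_pos hm2]
          · rw [if_neg hm2]
            have hne2 : ((h:Int)+1) ≠ top := fun he => hm2 (he ▸ hmem2)
            rw [if_neg hne2]
            exact (sVal_eq_zero_iff _ _).mpr hm2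
      · by_cases hhidx : h = idx
        · subst hhidx
          rw [getD_set_self _ _ _ (by rw [hqlen]; exact hidx), (hfq idx hidx).2, hidxtop,
              List.count_append]
          simp
        · rw [getD_set_ne _ _ _ _ (fun he => hhidx he.symm), (hfq h hh).2, List.count_append]
          have : List.count ((h:Int)+1) [top] = 0 := by
            simp [List.count_singleton]
            exact fun he => (hne_of hhidx) he.symm
          rw [this]
          simp

-- B's traced values coincide with A's simulated list at the end
theorem pvBack_eq_stA (k : Int) (hk : 2 ≤ k) (m : Int) (hm1 : 1 ≤ m) (hmk : m ≤ k)
    (p : Nat) (hp : p < (2*k).toNat) :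
    pvBack (p:Int) m = (stA k m.toNat).1.getD p 0 := by
  unfold pvBack
  rw [stA_getD_eq_trace k hk m.toNat (by omega) p hp,
      show ((m.toNat : Nat) : Int) = m by omega]

theorem tops_eq_topsUpTo (k : Int) (hk : 2 ≤ k) :
    (PySem.List.pyRange 1 (k+1) 1).map (fun m => pvBack 0 m) = topsUpTo k k.toNat := by
  unfold topsUpTo
  rw [show ((k.toNat : Nat) : Int) + 1 = k + 1 by omega]
  apply List.map_congr_left
  intro m hm
  have := PySem.List.mem_pyRange_one.mp hm
  exact pvBack_eq_stA k hk m (by omega) (by omega) 0 (by omega)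

-- ===== VERDICT (by name: the statement is the Claim_ definition above) =====
theorem complete_shuffle_spec : Claim_equal_complete_shuffle := by
  intro k _ hk
  unfold Spec_complete_shuffle
  have hk2 : 2 ≤ k := hk
  have hkj : ((k.toNat : Nat) : Int) = k := by omega
  have hA : complete_shuffle k =
      ([(stA k k.toNat).1.getD 0 0, (stA k k.toNat).1.getD 1 0, (stA k k.toNat).1.getD 2 0],
       (stA k k.toNat).2.1.getD ((stA k k.toNat).1.getD 0 0 - 1).toNat 0,
       (stA k k.toNat).2.2.getD ((stA k k.toNat).1.getD 0 0 - 1).toNat 0) := by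
    unfold complete_shuffle stA
    rw [hkj]
  have hb0 := pvBack_eq_stA k hk2 k (by omega) (le_refl k) 0 (by omega)
  have hb1 := pvBack_eq_stA k hk2 k (by omega) (le_refl k) 1 (by omega)
  have hb2 := pvBack_eq_stA k hk2 k (by omega) (le_refl k) 2 (by omega)
  have hB : complete_shuffle_alt k =
      ([(stA k k.toNat).1.getD 0 0, (stA k k.toNat).1.getD 1 0, (stA k k.toNat).1.getD 2 0],
       sVal (topsUpTo k k.toNat) ((stA k k.toNat).1.getD 0 0),
       ((topsUpTo k k.toNat).count ((stA k k.toNat).1.getD 0 0) : Int)) := by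
    unfold complete_shuffle_alt sVal
    rw [tops_eq_topsUpTo k hk2]
    push_cast at hb0 hb1 hb2
    rw [hb0, hb1, hb2]
    simp only [List.getD_cons_zero]
    rw [PySem.List.count_eq]
  obtain ⟨hmem, hflen, hqlen, hfq⟩ := invariant k hk2 k.toNat (by omega)
  rw [hA, hB]
  have hlen := stA_len k hk2 k.toNat (by omega)
  have hpos : 0 < (stA k k.toNat).1.length := by rw [hlen]; omega
  have htopmem : (stA k k.toNat).1.getD 0 0 ∈ (stA k k.toNat).1 := by
    rw [List.getD_eq_getElem?_getD, List.getElem?_eq_getElem hpos]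
    exact List.getElem_mem _
  have htopb := hmem _ htopmem
  set top := (stA k k.toNat).1.getD 0 0 with htopdef
  have hidx : (top - 1).toNat < (2*k).toNat := by omega
  have hidxtop : (((top-1).toNat : Nat) : Int) + 1 = top := by omega
  obtain ⟨h1, h2⟩ := hfq (top-1).toNat hidx
  rw [hidxtop] at h1 h2
  rw [h1, h2]
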